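-- pv_equiv track=rewrite | github.com/fj-fj-fj/parsers | parsers/zvk/_try_combinatorics.py | combine_unique_params
-- ===== SOURCE A (Python) =====
-- import itertools
--
-- def combine_unique_params(base, pool):
--     length_subsequences = itertools.count(1)
--
--     iteration = next(length_subsequences)
--     while iteration < len(pool) + 1:
--         for item in itertools.combinations(pool, iteration):
--             params = '-or-'.join(item).removesuffix('-or-')
--             yield f"{base}{'-is-' if iteration != 1 else '-'}{params}/\n"
--         iteration = next(length_subsequences)
-- ===== SOURCE B (Python) =====
-- def combine_unique_params(base, pool):
--     n = len(pool)
--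
--     def gen(start, k):
--         # index-order combinations of k elements of pool[start:]
--         if k == 0:
--             yield ()
--             return
--         for i in range(start, n - k + 1):
--             for rest in gen(i + 1, k - 1):
--                 yield (pool[i],) + rest
--
--     for k in range(1, n + 1):
--         sep = '-is-' if k != 1 else '-'
--         for item in gen(0, k):
--             params = '-or-'.join(item).removesuffix('-or-')
--             yield f"{base}{sep}{params}/\n"
-- ===== Notes on version B (the rewrite author's own statement) =====
-- stated objective: alternative
-- what changed: Replaces itertools.count + while + itertools.combinations with a plain for-loop over k and a hand-rolled recursive index-combination generator that builds each tuple front-to-back in the same lexicographic index order.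
import Mathlib
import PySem

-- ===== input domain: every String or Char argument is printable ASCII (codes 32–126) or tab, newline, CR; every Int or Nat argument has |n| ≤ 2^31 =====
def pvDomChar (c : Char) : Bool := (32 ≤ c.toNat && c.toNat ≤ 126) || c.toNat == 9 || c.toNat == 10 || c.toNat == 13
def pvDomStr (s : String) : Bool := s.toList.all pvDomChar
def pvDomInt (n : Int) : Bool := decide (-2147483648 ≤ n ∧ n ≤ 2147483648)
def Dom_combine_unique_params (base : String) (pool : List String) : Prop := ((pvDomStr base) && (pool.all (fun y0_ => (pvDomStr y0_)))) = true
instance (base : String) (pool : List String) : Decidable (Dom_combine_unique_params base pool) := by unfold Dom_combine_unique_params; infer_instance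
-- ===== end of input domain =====

-- B changes the decomposition only (hand-rolled recursive index combinations instead of
-- itertools.count/while/itertools.combinations); both generators yield identical strings.

-- ===== PORT A =====
-- params = '-or-'.join(item).removesuffix('-or-');  yield f"{base}{sep}{params}/\n"
-- (removesuffix has no PySem primitive; ported by hand on List Char, exact: drop the last
--  4 chars iff the join ends with "-or-"). Shared by both ports: both Pythons format identically.
def pvFmtLine (base sep : String) (item : List String) : String :=
  let ps := PySem.Chars.join ("-or-".toList) (item.map (fun s => s.toList))
  let ps := if PySem.Chars.endswith ps ("-or-".toList) then ps.take (ps.length - 4) else ps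
  String.ofList (base.toList ++ sep.toList ++ ps ++ ['/', '\n'])

-- itertools.combinations(xs, k): lexicographic in input order
def pvCombsA : Nat → List String → List (List String)
  | 0, _ => [[]]
  | _ + 1, [] => []
  | k + 1, x :: xs => (pvCombsA k xs).map (fun t => x :: t) ++ pvCombsA (k + 1) xs

-- while iteration < len(pool)+1 with iteration = next(count(1)) is the loop k = 1 .. len(pool)
def combine_unique_params (base : String) (pool : List String) : List String :=
  (List.range' 1 pool.length).flatMap (fun k =>
    (pvCombsA k pool).map (fun item =>
      pvFmtLine base (if k ≠ 1 then "-is-" else "-") item))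

-- ===== PORT B =====
-- gen(start, k): for i in range(start, n-k+1): for rest in gen(i+1, k-1): yield (pool[i],)+rest
def pvGenB (pool : List String) : Nat → Nat → List (List String)
  | _, 0 => [[]]
  | start, k + 1 =>
    (List.range' start (pool.length - k - start)).flatMap (fun i =>
      (pvGenB pool (i + 1) k).map (fun rest => pool.getD i "" :: rest))

def combine_unique_params_alt (base : String) (pool : List String) : List String :=
  (List.range' 1 pool.length).flatMap (fun k =>
    let sep := if k ≠ 1 then "-is-" else "-"
    (pvGenB pool 0 k).map (fun item => pvFmtLine base sep item))

-- ===== PRECONDITION & SPEC =====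
def Spec_combine_unique_params (base : String) (pool : List String) (out : List String) : Prop := out = combine_unique_params_alt base pool
instance (base : String) (pool : List String) (out : List String) : Decidable (Spec_combine_unique_params base pool out) := by unfold Spec_combine_unique_params; infer_instance

-- ===== CLAIM (what is proved, stated in full; the proofs are below) =====
def Claim_equal_combine_unique_params : Prop := ∀ (base : String) (pool : List String), Dom_combine_unique_params base pool → Spec_combine_unique_params base pool (combine_unique_params base pool)

-- ===== LEMMAS AND PROOFS =====

lemma pvCombsA_of_short : ∀ (xs : List String) (k : Nat), xs.length < k → pvCombsA k xs = [] := by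
  intro xs
  induction xs with
  | nil =>
    intro k h
    match k with
    | k + 1 => rfl
  | cons x xs ih =>
    intro k h
    match k with
    | k + 1 =>
      simp only [pvCombsA]
      rw [ih k (by simp at h; omega), ih (k + 1) (by simp at h; omega)]
      rfl

lemma pvGenB_eq (pool : List String) :
    ∀ (k start : Nat), pvGenB pool start k = pvCombsA k (pool.drop start) := by
  intro k
  induction k with
  | zero => intro start; simp [pvGenB, pvCombsA]
  | succ k ih =>
    -- inner downward induction on pool.length - start
    suffices H : ∀ (m start : Nat), pool.length - start ≤ m →
        pvGenB pool start (k + 1) = pvCombsA (k + 1) (pool.drop start) by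
      intro start; exact H (pool.length - start) start le_rfl
    intro m
    induction m with
    | zero =>
      intro start h
      have hlen : pool.length ≤ start := by omega
      rw [List.drop_eq_nil_of_le hlen]
      simp [pvGenB, pvCombsA, Nat.sub_eq_zero_of_le (le_trans (Nat.sub_le _ _) hlen)]
    | succ m ihm =>
      intro start h
      by_cases hs : pool.length ≤ start
      · rw [List.drop_eq_nil_of_le hs]
        simp [pvGenB, pvCombsA, Nat.sub_eq_zero_of_le (le_trans (Nat.sub_le _ _) hs)]
      · push Not at hs
        by_cases hk : pool.length - k ≤ start
        · -- range empty, drop too short for k+1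
          have : pool.length - k - start = 0 := Nat.sub_eq_zero_of_le hk
          rw [pvCombsA_of_short _ (k + 1) (by simp; omega)]
          simp [pvGenB, this]
        · push Not at hk
          have hc : pool.length - k - start = (pool.length - k - (start + 1)) + 1 := by omega
          have hdrop : pool.drop start = pool[start]'hs :: pool.drop (start + 1) := by
            rw [List.getElem_cons_drop]
          rw [hdrop]
          simp only [pvGenB, hc, List.range'_succ, List.flatMap_cons, pvCombsA]
          have hback : List.flatMap (fun i => (pvGenB pool (i + 1) k).map (fun rest => pool.getD i "" :: rest))
              (List.range' (start + 1) (pool.length - k - (start + 1))) = pvGenB pool (start + 1) (k + 1) := rfl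
          rw [hback, ihm (start + 1) (by omega)]
          have : pool.getD start "" = pool[start] := List.getD_eq_getElem pool "" hs
          rw [this, ih (start + 1)]

-- ===== VERDICT (by name: the statement is the Claim_ definition above) =====
theorem combine_unique_params_spec : Claim_equal_combine_unique_params := by
  intro base pool _
  unfold Spec_combine_unique_params combine_unique_params combine_unique_params_alt
  congr 1
  funext k
  simp only [pvGenB_eq pool k 0, List.drop_zero]
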